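-- pv_equiv track=rewrite | github.com/karl21-02/ora-automation | src/ora_rd_orchestrator/engine.py | _service_alias_to_scope
-- ===== SOURCE A (Python) =====
-- SERVICE_ALIAS_MAP: dict[str, list[str]] = {
--     "b2b": ["orab2bserver", "orab2bserver", "ora-b2b", "b2bserver"],
--     "b2b-android": ["orab2bandroid", "ora-b2b-android", "mobile", "android"],
--     "b2c": [
--         "orawebappfrontend",
--         "orawebappserver",
--         "oramainfrontend",
--         "orab2c",
--         "ora-admin-frontend",
--         "oraadminfrontend",
--     ],
--     "ai": ["oraaiserver", "oraiserver", "ai", "llm_server", "tts_server"],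
--     "telecom": ["oraserver", "oraserver", "telecom", "callserver"],
--     "docs": ["oradocs", "ora-docs", "docs", "readme"],
-- }
--
-- def _normalize_text_token(value: str) -> str:
--     return value.strip().lower().replace("-", "")
--
-- def _service_alias_to_scope(service: str) -> str:
--     key = _normalize_text_token(service)
--     if not key:
--         return ""
--     for scope, aliases in SERVICE_ALIAS_MAP.items():
--         scope_key = _normalize_text_token(scope)
--         if key == scope_key:
--             return scope
--         alias_keys = {scope_key}
--         alias_keys.update({_normalize_text_token(token) for token in aliases})
--         if key in alias_keys:
--             return scope
--     return key
-- ===== SOURCE B (Python) =====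
-- SERVICE_ALIAS_MAP: dict[str, list[str]] = {
--     "b2b": ["orab2bserver", "orab2bserver", "ora-b2b", "b2bserver"],
--     "b2b-android": ["orab2bandroid", "ora-b2b-android", "mobile", "android"],
--     "b2c": [
--         "orawebappfrontend",
--         "orawebappserver",
--         "oramainfrontend",
--         "orab2c",
--         "ora-admin-frontend",
--         "oraadminfrontend",
--     ],
--     "ai": ["oraaiserver", "oraiserver", "ai", "llm_server", "tts_server"],
--     "telecom": ["oraserver", "oraserver", "telecom", "callserver"],
--     "docs": ["oradocs", "ora-docs", "docs", "readme"],
-- }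
--
-- def _normalize_text_token(value: str) -> str:
--     return value.strip().lower().replace("-", "")
--
-- # One flat index built once: normalized token -> scope, first scope wins.
-- ALIAS_INDEX: dict[str, str] = {}
-- for _scope, _aliases in SERVICE_ALIAS_MAP.items():
--     for _token in (_scope, *_aliases):
--         ALIAS_INDEX.setdefault(_normalize_text_token(_token), _scope)
--
-- def _service_alias_to_scope(service: str) -> str:
--     key = _normalize_text_token(service)
--     if not key:
--         return ""
--     return ALIAS_INDEX.get(key, key)
-- ===== Notes on version B (the rewrite author's own statement) =====
-- stated objective: faster
-- what changed: Replaces the per-call scan over SERVICE_ALIAS_MAP (normalizing every scope and alias and building a fresh set on each iteration) with a module-level flat dict ALIAS_INDEX built once via setdefault (first scope wins), so each call is a single O(1) lookup after normalizing the input.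
import Mathlib
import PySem

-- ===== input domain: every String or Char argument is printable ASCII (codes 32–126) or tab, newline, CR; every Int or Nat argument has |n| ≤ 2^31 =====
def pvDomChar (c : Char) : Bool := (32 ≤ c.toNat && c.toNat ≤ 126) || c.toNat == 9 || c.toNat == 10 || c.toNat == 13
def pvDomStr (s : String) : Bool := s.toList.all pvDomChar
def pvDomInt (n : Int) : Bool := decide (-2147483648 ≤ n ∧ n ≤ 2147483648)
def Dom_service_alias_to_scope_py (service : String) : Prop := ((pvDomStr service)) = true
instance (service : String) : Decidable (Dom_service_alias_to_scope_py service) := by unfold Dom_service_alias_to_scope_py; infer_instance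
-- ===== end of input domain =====

-- B builds one flat token→scope index (setdefault, first scope wins) instead of
-- A's per-call scan over SERVICE_ALIAS_MAP; equivalence of the two lookups is proved.

-- shared module data/helper (used by both Pythons in the same module)
def serviceAliasMap : List (String × List String) :=
  [ ("b2b", ["orab2bserver", "orab2bserver", "ora-b2b", "b2bserver"]),
    ("b2b-android", ["orab2bandroid", "ora-b2b-android", "mobile", "android"]),
    ("b2c", ["orawebappfrontend", "orawebappserver", "oramainfrontend", "orab2c",
             "ora-admin-frontend", "oraadminfrontend"]),
    ("ai", ["oraaiserver", "oraiserver", "ai", "llm_server", "tts_server"]),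
    ("telecom", ["oraserver", "oraserver", "telecom", "callserver"]),
    ("docs", ["oradocs", "ora-docs", "docs", "readme"]) ]

def normTok (value : String) : String :=
  PySem.Str.replace (PySem.Str.lower (PySem.Str.strip value)) "-" ""

-- ===== PORT A =====
-- the for-loop over SERVICE_ALIAS_MAP.items(): first matching group's scope, else the key
def aliasLoop (key : String) : List (String × List String) → String
  | [] => key
  | (scope, aliases) :: rest =>
      let scopeKey := normTok scope
      if key == scopeKey then scope
      else
        let aliasKeys := PySem.Set.update (PySem.Set.ofList [scopeKey])
                          (PySem.Set.ofList (aliases.map normTok))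
        if PySem.Set.contains aliasKeys key then scope
        else aliasLoop key rest

def service_alias_to_scope_py (service : String) : String :=
  let key := normTok service
  if key == "" then ""
  else aliasLoop key serviceAliasMap

-- ===== PORT B =====
-- inner loop: for token in (scope, *aliases): ALIAS_INDEX.setdefault(norm(token), scope)
def addTokens (d : PySem.Dict String String) (scope : String) (tokens : List String) :
    PySem.Dict String String :=
  tokens.foldl (fun d tok => d.setdefault (normTok tok) scope) d

def aliasIndex : PySem.Dict String String :=
  serviceAliasMap.foldl (fun d p => addTokens d p.1 (p.1 :: p.2)) PySem.Dict.empty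

def service_alias_to_scope_py_alt (service : String) : String :=
  let key := normTok service
  if key == "" then ""
  else aliasIndex.getD key key

-- ===== PRECONDITION & SPEC =====
def Spec_service_alias_to_scope_py (service : String) (out : String) : Prop := out = service_alias_to_scope_py_alt service
instance (service : String) (out : String) : Decidable (Spec_service_alias_to_scope_py service out) := by unfold Spec_service_alias_to_scope_py; infer_instance

-- ===== CLAIM (what is proved, stated in full; the proofs are below) =====
def Claim_equal_service_alias_to_scope_py : Prop := ∀ (service : String), Dom_service_alias_to_scope_py service → Spec_service_alias_to_scope_py service (service_alias_to_scope_py service)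

-- ===== LEMMAS AND PROOFS =====

-- inner setdefault fold: lookup is the old lookup, else first scope whose token matches
theorem get?_addTokens (d : PySem.Dict String String) (scope : String)
    (ts : List String) (key : String) :
    (addTokens d scope ts).get? key =
      ((d.get? key).orElse (fun _ =>
        if key ∈ ts.map normTok then some scope else none)) := by
  induction ts generalizing d with
  | nil => simp [addTokens]
  | cons t ts ih =>
      simp only [addTokens, List.foldl_cons]
      rw [show (ts.foldl (fun d tok => d.setdefault (normTok tok) scope)
            (d.setdefault (normTok t) scope)) = addTokens (d.setdefault (normTok t) scope) scope ts from rfl,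
          ih]
      by_cases hk : key = normTok t
      · subst hk
        rw [PySem.Dict.get?_setdefault_self]
        cases h : d.get? (normTok t) <;>
          simp [Option.orElse, List.map_cons, List.mem_cons]
      · rw [PySem.Dict.get?_setdefault_of_ne d scope hk]
        cases h : d.get? key <;>
          simp [Option.orElse, List.map_cons, List.mem_cons, hk]

-- one group of A's loop: scope if the key matches any of the group's normalized tokens
theorem aliasLoop_cons (key scope : String) (aliases : List String)
    (m : List (String × List String)) :
    aliasLoop key ((scope, aliases) :: m) =
      if key ∈ (scope :: aliases).map normTok then scope else aliasLoop key m := by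
  simp only [aliasLoop]
  by_cases h1 : key = normTok scope
  · simp [h1, List.map_cons, List.mem_cons]
  · have h2 : (key == normTok scope) = false := beq_eq_false_iff_ne.mpr h1
    simp only [h2, Bool.false_eq_true, if_false, List.map_cons, List.mem_cons]
    have hset : (PySem.Set.update (PySem.Set.ofList [normTok scope])
        (PySem.Set.ofList (aliases.map normTok))).contains key = true ↔
        key ∈ aliases.map normTok := by
      rw [PySem.Set.contains_iff, PySem.Set.mem_update, PySem.Set.mem_ofList,
          PySem.Set.mem_ofList]
      simp [h1]
    by_cases h3 : key ∈ aliases.map normTok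
    · rw [if_pos (hset.mpr h3), if_pos (Or.inr h3)]
    · rw [if_neg (fun hc => h3 (hset.mp hc)), if_neg (fun hor => hor.elim h1 h3)]

-- outer fold: final lookup = old lookup, else A's scan over the remaining groups
theorem get?_index_loop (m : List (String × List String)) (d : PySem.Dict String String)
    (key : String) :
    ((m.foldl (fun d p => addTokens d p.1 (p.1 :: p.2)) d).getD key key) =
      (match d.get? key with
       | some v => v
       | none => aliasLoop key m) := by
  induction m generalizing d with
  | nil =>
      rw [List.foldl_nil, PySem.Dict.getD_eq_get?_getD]
      cases h : d.get? key <;> simp [aliasLoop]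
  | cons p m ih =>
      obtain ⟨scope, aliases⟩ := p
      rw [List.foldl_cons, ih, get?_addTokens, aliasLoop_cons]
      cases h : d.get? key with
      | some v => simp [Option.orElse]
      | none =>
          simp only [Option.orElse]
          by_cases hc : key ∈ (scope :: aliases).map normTok
          · rw [if_pos hc]; rw [if_pos hc]
          · rw [if_neg hc]; rw [if_neg hc]

-- ===== VERDICT (by name: the statement is the Claim_ definition above) =====
theorem service_alias_to_scope_py_spec : Claim_equal_service_alias_to_scope_py := by
  intro service _
  unfold Spec_service_alias_to_scope_py service_alias_to_scope_py service_alias_to_scope_py_alt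
  by_cases h : normTok service == ""
  · simp [h]
  · simp only [h, if_false, Bool.false_eq_true]
    rw [show aliasIndex = serviceAliasMap.foldl (fun d p => addTokens d p.1 (p.1 :: p.2)) PySem.Dict.empty from rfl,
        get?_index_loop]
    simp [PySem.Dict.get?_empty]
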